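-- pv_equiv track=rewrite | github.com/Exploding-Soda/Simple-Python-Vector-Database | app.py | split_sentences_to_chunks
-- ===== SOURCE A (Python) =====
-- def split_sentences_to_chunks(sentences, max_chunk_size=200):
--     chunks = []
--     current_chunk = ""
--
--     for sentence in sentences:
--         if len(current_chunk) + len(sentence) <= max_chunk_size:
--             current_chunk += sentence
--         else:
--             if current_chunk:
--                 chunks.append(current_chunk.strip())
--             current_chunk = sentence
--     if current_chunk:
--         chunks.append(current_chunk.strip())
--
--     return chunks
-- ===== SOURCE B (Python) =====
-- def split_sentences_to_chunks(sentences, max_chunk_size=200):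
--     # Index-jumping: for each chunk start i, advance j greedily while the raw
--     # lengths fit, then render sentences[i:j] at once; skip zero-length groups.
--     lens = [len(s) for s in sentences]
--     n = len(sentences)
--     chunks = []
--     i = 0
--     while i < n:
--         total = lens[i]
--         j = i + 1
--         while j < n and total + lens[j] <= max_chunk_size:
--             total += lens[j]
--             j += 1
--         if total:
--             chunks.append("".join(sentences[i:j]).strip())
--         i = j
--     return chunks
-- ===== Notes on version B (the rewrite author's own statement) =====
-- stated objective: alternative
-- what changed: B replaces A's streaming accumulator (grow a current string, flush on overflow) with index jumping over a precomputed length table: an outer loop per chunk finds the group's end index with an inner greedy scan over lens, then renders sentences[i:j] by one join+strip; zero-total groups are skipped.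
import Mathlib
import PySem

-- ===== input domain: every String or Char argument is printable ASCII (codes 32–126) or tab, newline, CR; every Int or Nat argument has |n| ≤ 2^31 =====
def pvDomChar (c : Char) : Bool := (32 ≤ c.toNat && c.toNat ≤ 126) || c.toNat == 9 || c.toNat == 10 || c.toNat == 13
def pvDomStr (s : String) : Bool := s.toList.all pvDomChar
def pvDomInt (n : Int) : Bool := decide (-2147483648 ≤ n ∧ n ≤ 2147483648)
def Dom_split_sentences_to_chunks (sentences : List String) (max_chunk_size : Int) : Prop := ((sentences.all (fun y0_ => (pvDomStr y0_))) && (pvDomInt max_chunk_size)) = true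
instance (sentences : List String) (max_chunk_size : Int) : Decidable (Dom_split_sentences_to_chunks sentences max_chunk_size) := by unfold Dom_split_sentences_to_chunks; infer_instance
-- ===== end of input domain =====

-- B replaces A's streaming string accumulator with index jumping over a precomputed
-- length table (outer loop per chunk, inner scan for the end index, one join+strip per
-- group); return values proved equal to A's on all inputs.

-- ===== PORT A =====
-- current_chunk is kept as List Char (PySem's string representation)
def split_sentences_to_chunks (sentences : List String) (max_chunk_size : Int) : List String :=
  let fin := sentences.foldl
    (fun (st : List String × List Char) (sentence : String) =>
      if (st.2.length : Int) + (sentence.toList.length : Int) ≤ max_chunk_size then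
        (st.1, st.2 ++ sentence.toList)
      else
        ((if st.2 = [] then st.1 else st.1 ++ [String.ofList (PySem.Chars.strip st.2)]),
         sentence.toList))
    ([], [])
  if fin.2 = [] then fin.1 else fin.1 ++ [String.ofList (PySem.Chars.strip fin.2)]

-- ===== PORT B =====
-- inner 'while j < n and total + lens[j] <= max_chunk_size' loop
def pvFindEnd (lens : List Int) (n : Nat) (m : Int) (total : Int) (j : Nat) : Int × Nat :=
  if _h : j < n ∧ total + lens.getD j 0 ≤ m then
    pvFindEnd lens n m (total + lens.getD j 0) (j + 1)
  else
    (total, j)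
termination_by n - j
decreasing_by omega

-- termination fact for the outer loop: the inner loop never moves j backwards
theorem pvFindEnd_ge (lens : List Int) (n : Nat) (m : Int) (total : Int) (j : Nat) :
    j ≤ (pvFindEnd lens n m total j).2 := by
  unfold pvFindEnd
  split
  · exact le_trans (by omega) (pvFindEnd_ge lens n m _ (j + 1))
  · simp
termination_by n - j
decreasing_by omega

-- outer 'while i < n' loop
def pvOuter (sentences : List String) (lens : List Int) (n : Nat) (m : Int) (i : Nat)
    (chunks : List String) : List String :=
  if h : i < n then
    let r := pvFindEnd lens n m (lens.getD i 0) (i + 1)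
    pvOuter sentences lens n m r.2
      (if r.1 ≠ 0 then
        chunks ++ [PySem.Str.strip (PySem.Str.join ""
          (PySem.List.slice sentences (some (i : Int)) (some (r.2 : Int))))]
       else chunks)
  else chunks
termination_by n - i
decreasing_by
  have := pvFindEnd_ge lens n m (lens.getD i 0) (i + 1); omega

def split_sentences_to_chunks_alt (sentences : List String) (max_chunk_size : Int) : List String :=
  pvOuter sentences (sentences.map (fun s => (s.toList.length : Int))) sentences.length
    max_chunk_size 0 []

-- ===== PRECONDITION & SPEC =====
def Spec_split_sentences_to_chunks (sentences : List String) (max_chunk_size : Int) (out : List String) : Prop := out = split_sentences_to_chunks_alt sentences max_chunk_size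
instance (sentences : List String) (max_chunk_size : Int) (out : List String) : Decidable (Spec_split_sentences_to_chunks sentences max_chunk_size out) := by unfold Spec_split_sentences_to_chunks; infer_instance

-- ===== CLAIM (what is proved, stated in full; the proofs are below) =====
def Claim_equal_split_sentences_to_chunks : Prop := ∀ (sentences : List String) (max_chunk_size : Int), Dom_split_sentences_to_chunks sentences max_chunk_size → Spec_split_sentences_to_chunks sentences max_chunk_size (split_sentences_to_chunks sentences max_chunk_size)

-- ===== LEMMAS AND PROOFS =====

-- proof-side name for A's loop body (definitionally the port's lambda)
def pvStepA (m : Int) (st : List String × List Char) (sentence : String) : List String × List Char :=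
  if (st.2.length : Int) + (sentence.toList.length : Int) ≤ m then
    (st.1, st.2 ++ sentence.toList)
  else
    ((if st.2 = [] then st.1 else st.1 ++ [String.ofList (PySem.Chars.strip st.2)]),
     sentence.toList)

def pvFinA (st : List String × List Char) : List String :=
  if st.2 = [] then st.1 else st.1 ++ [String.ofList (PySem.Chars.strip st.2)]

-- the characters of a group of sentences, as one flat list
def pvJoinChars (g : List String) : List Char := (g.map String.toList).flatten

-- characters of the group sentences[i:j]
def pvC (sentences : List String) (i j : Nat) : List Char :=
  pvJoinChars ((sentences.drop i).take (j - i))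

-- unfolding lemmas for the outer loop (well-founded defs do not reduce by rfl)
lemma pvOuter_step (sentences : List String) (lens : List Int) (n : Nat) (m : Int) (i : Nat)
    (chunks : List String) (h : i < n) :
    pvOuter sentences lens n m i chunks
      = pvOuter sentences lens n m (pvFindEnd lens n m (lens.getD i 0) (i + 1)).2
          (if (pvFindEnd lens n m (lens.getD i 0) (i + 1)).1 ≠ 0 then
            chunks ++ [PySem.Str.strip (PySem.Str.join ""
              (PySem.List.slice sentences (some (i : Int))
                (some ((pvFindEnd lens n m (lens.getD i 0) (i + 1)).2 : Int))))]
           else chunks) := by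
  rw [pvOuter]
  simp [h]

lemma pvOuter_stop (sentences : List String) (lens : List Int) (n : Nat) (m : Int) (i : Nat)
    (chunks : List String) (h : ¬ i < n) :
    pvOuter sentences lens n m i chunks = chunks := by
  rw [pvOuter]
  simp [h]

lemma pvJoin_empty_eq (g : List String) :
    PySem.Chars.join [] (g.map String.toList) = pvJoinChars g := by
  show [].intercalate (g.map String.toList) = pvJoinChars g
  unfold pvJoinChars
  generalize g.map String.toList = l
  induction l with
  | nil => rfl
  | cons x xs ih =>
      cases xs with
      | nil => simp [List.intercalate]
      | cons y ys => simp_all [List.intercalate, List.intersperse]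

lemma pvRender_eq (g : List String) :
    PySem.Str.strip (PySem.Str.join "" g) = String.ofList (PySem.Chars.strip (pvJoinChars g)) := by
  have h : (PySem.Str.strip (PySem.Str.join "" g)).toList
      = (String.ofList (PySem.Chars.strip (pvJoinChars g))).toList := by
    simp [PySem.Str.toList_strip, pvJoin_empty_eq]
  exact String.toList_inj.mp h

lemma pvLens_getD (sentences : List String) (j : Nat) (hj : j < sentences.length) :
    (sentences.map (fun s => (s.toList.length : Int))).getD j 0
      = ((sentences[j]).toList.length : Int) := by
  rw [List.getD_eq_getElem?_getD]
  simp [List.getElem?_eq_getElem (by simpa using hj : j < (sentences.map _).length)]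

lemma pvC_succ (sentences : List String) (i j : Nat) (h1 : i ≤ j) (h2 : j < sentences.length) :
    pvC sentences i (j + 1) = pvC sentences i j ++ (sentences[j]).toList := by
  unfold pvC
  have hs : j + 1 - i = (j - i) + 1 := by omega
  rw [hs, List.take_add_one]
  have hg : (sentences.drop i)[j - i]? = some sentences[j] := by
    rw [List.getElem?_drop, show i + (j - i) = j from by omega]
    exact List.getElem?_eq_getElem h2
  simp [pvJoinChars, hg]

lemma pvC_start (sentences : List String) (j : Nat) (h2 : j < sentences.length) :
    pvC sentences j (j + 1) = (sentences[j]).toList := by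
  have := pvC_succ sentences j j le_rfl h2
  simpa [pvC, pvJoinChars] using this

lemma pvC_len_ne (C : List Char) : (((C.length : Nat) : Int) ≠ 0) ↔ C ≠ [] := by
  simp

-- A's flush of the accumulated chars = B's render of the slice sentences[i0:j]
lemma pvChunks_eq (sentences : List String) (i0 j : Nat) (chunks : List String) :
    (if (((pvC sentences i0 j).length : Nat) : Int) ≠ 0 then
        chunks ++ [PySem.Str.strip (PySem.Str.join ""
          (PySem.List.slice sentences (some (i0 : Int)) (some (j : Int))))]
      else chunks)
    = (if pvC sentences i0 j = [] then chunks
        else chunks ++ [String.ofList (PySem.Chars.strip (pvC sentences i0 j))]) := by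
  by_cases hC : pvC sentences i0 j = []
  · simp [hC]
  · rw [if_neg hC, if_pos (by simpa [pvC_len_ne] using hC),
        PySem.List.slice_natCast, pvRender_eq]
    rfl

-- main invariant: from any group start i0 and scan position j, A's remaining fold
-- equals B's inner-scan-then-render-then-outer-loop
theorem pvExt (sentences : List String) (m : Int) (i0 j : Nat) (chunks : List String)
    (hij : i0 ≤ j) :
    pvFinA ((sentences.drop j).foldl (pvStepA m) (chunks, pvC sentences i0 j))
      = pvOuter sentences (sentences.map (fun s => (s.toList.length : Int))) sentences.length m
          (pvFindEnd (sentences.map (fun s => (s.toList.length : Int))) sentences.length m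
            (((pvC sentences i0 j).length : Int)) j).2
          (if (pvFindEnd (sentences.map (fun s => (s.toList.length : Int))) sentences.length m
                (((pvC sentences i0 j).length : Int)) j).1 ≠ 0 then
            chunks ++ [PySem.Str.strip (PySem.Str.join ""
              (PySem.List.slice sentences (some (i0 : Int))
                (some (((pvFindEnd (sentences.map (fun s => (s.toList.length : Int)))
                  sentences.length m (((pvC sentences i0 j).length : Int)) j).2 : Nat) : Int))))]
           else chunks) := by
  by_cases hj : j < sentences.length
  · rw [List.drop_eq_getElem_cons hj, List.foldl_cons]
    by_cases hc : ((pvC sentences i0 j).length : Int) + ((sentences[j]).toList.length : Int) ≤ m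
    · -- the sentence fits: both sides extend the current group
      have hA : pvStepA m (chunks, pvC sentences i0 j) sentences[j]
          = (chunks, pvC sentences i0 (j + 1)) := by
        simp only [pvStepA]
        rw [if_pos hc, pvC_succ sentences i0 j hij hj]
      have hF : pvFindEnd (sentences.map (fun s => (s.toList.length : Int))) sentences.length m
            (((pvC sentences i0 j).length : Int)) j
          = pvFindEnd (sentences.map (fun s => (s.toList.length : Int))) sentences.length m
            (((pvC sentences i0 (j + 1)).length : Int)) (j + 1) := by
        rw [pvFindEnd]
        rw [dif_pos ⟨hj, by rw [pvLens_getD sentences j hj]; exact hc⟩]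
        congr 1
        rw [pvLens_getD sentences j hj, pvC_succ sentences i0 j hij hj]
        simp
      rw [hA, hF]
      exact pvExt sentences m i0 (j + 1) chunks (by omega)
    · -- the sentence does not fit: A flushes, B closes the group at j
      have hF : pvFindEnd (sentences.map (fun s => (s.toList.length : Int))) sentences.length m
            (((pvC sentences i0 j).length : Int)) j
          = (((pvC sentences i0 j).length : Int), j) := by
        rw [pvFindEnd]
        rw [dif_neg]
        intro ⟨_, hle⟩
        rw [pvLens_getD sentences j hj] at hle
        exact hc hle
      have hA : pvStepA m (chunks, pvC sentences i0 j) sentences[j]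
          = ((if (pvC sentences i0 j) = [] then chunks
              else chunks ++ [String.ofList (PySem.Chars.strip (pvC sentences i0 j))]),
             pvC sentences j (j + 1)) := by
        simp only [pvStepA]
        rw [if_neg hc, pvC_start sentences j hj]
      rw [hA, hF]
      dsimp only
      rw [pvOuter_step _ _ _ _ _ _ hj,
          pvLens_getD sentences j hj, ← pvC_start sentences j hj, pvChunks_eq]
      exact pvExt sentences m j (j + 1) _ (by omega)
  · -- j past the end: fold is done, inner scan stops, outer loop stops
    have hd : sentences.drop j = [] := List.drop_eq_nil_of_le (by omega)
    have hF : pvFindEnd (sentences.map (fun s => (s.toList.length : Int))) sentences.length m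
          (((pvC sentences i0 j).length : Int)) j
        = (((pvC sentences i0 j).length : Int), j) := by
      rw [pvFindEnd, dif_neg]
      intro ⟨hlt, _⟩
      exact hj (by simpa using hlt)
    rw [hd, hF, List.foldl_nil, pvOuter_stop _ _ _ _ _ _ (by simpa using hj)]
    dsimp only
    rw [pvChunks_eq]
    rfl
termination_by sentences.length - j
decreasing_by all_goals omega

-- ===== VERDICT (by name: the statement is the Claim_ definition above) =====
theorem split_sentences_to_chunks_spec : Claim_equal_split_sentences_to_chunks := by
  intro sentences m _
  show split_sentences_to_chunks sentences m = split_sentences_to_chunks_alt sentences m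
  rcases sentences with _ | ⟨s0, rest⟩
  · show pvFinA (([] : List String).foldl (pvStepA m) ([], []))
      = pvOuter [] [] 0 m 0 []
    rw [pvOuter_stop _ _ _ _ _ _ (by omega)]
    rfl
  · have hn : 0 < (s0 :: rest).length := by simp
    have hC1 : pvC (s0 :: rest) 0 1 = s0.toList := by
      simp [pvC, pvJoinChars]
    have hstep : pvStepA m ([], []) s0 = ([], pvC (s0 :: rest) 0 1) := by
      rw [hC1]
      simp only [pvStepA]
      split <;> simp
    have hext := pvExt (s0 :: rest) m 0 1 [] (by omega)
    simp only [List.drop_succ_cons, List.drop_zero] at hext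
    have hlen0 : ((s0 :: rest).map (fun s => (s.toList.length : Int))).getD 0 0
        = ((pvC (s0 :: rest) 0 1).length : Int) := by
      rw [pvLens_getD (s0 :: rest) 0 hn, hC1]
      rfl
    show pvFinA ((s0 :: rest).foldl (pvStepA m) ([], []))
      = pvOuter (s0 :: rest) ((s0 :: rest).map (fun s => (s.toList.length : Int)))
          (s0 :: rest).length m 0 []
    rw [List.foldl_cons, hstep, hext, pvOuter_step _ _ _ _ _ _ hn, hlen0]
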